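-- pv_equiv track=rewrite | github.com/akashgoyal1807/CSE-NETWORK-SECURITY | CSE_NETWORK_SECURITY/main.py | reciprocalString
-- ===== SOURCE A (Python) =====
-- def isupper(ch):
--     if ch >= 'A' and ch <= 'Z':
--         return True
--     return False
--
-- def islower(ch):
--     if ch >= 'a' and ch <= 'z':
--         return True
--     return False
--
-- def reciprocalString(word):
--     ch = ''
--     ct = ""
--     for i in range(len(word)):
--
--         # converting uppercase character
--         # To reciprocal character
--         # display the character
--         if isupper(word[i]):
--             ch = chr(ord('Z') -
--                      ord(word[i]) + ord('A'))
--             ct=ct+ch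
--
--
--
--         # converting lowercase character
--         # To reciprocal character
--         # display the character
--         elif islower(word[i]):
--             ch = chr(ord('z') -
--                      ord(word[i]) + ord('a'))
--             ct=ct+ch;
--         else:
--             ct=ct+word[i]
--
--     return ct;
-- ===== SOURCE B (Python) =====
-- _UPPER = 'ABCDEFGHIJKLMNOPQRSTUVWXYZ'
-- _LOWER = _UPPER.lower()
-- _TABLE = str.maketrans(_UPPER + _LOWER, _UPPER[::-1] + _LOWER[::-1])
--
-- def reciprocalString(word):
--     return word.translate(_TABLE)
-- ===== Notes on version B (the rewrite author's own statement) =====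
-- stated objective: idiomatic
-- what changed: Replaced the per-character if/elif branch arithmetic and string accumulation with a precomputed str.maketrans translation table applied in one word.translate call.
import Mathlib
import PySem

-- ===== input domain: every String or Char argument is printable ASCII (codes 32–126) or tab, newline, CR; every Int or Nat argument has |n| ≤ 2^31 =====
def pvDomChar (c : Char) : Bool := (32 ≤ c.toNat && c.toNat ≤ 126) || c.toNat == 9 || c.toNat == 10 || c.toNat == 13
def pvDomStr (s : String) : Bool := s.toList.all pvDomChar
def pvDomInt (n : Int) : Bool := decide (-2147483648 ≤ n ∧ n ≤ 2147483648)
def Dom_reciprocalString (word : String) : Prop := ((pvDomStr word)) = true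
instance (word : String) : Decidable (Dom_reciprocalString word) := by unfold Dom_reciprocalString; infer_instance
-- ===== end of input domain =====

-- B replaces A's per-character if/elif arithmetic by one precomputed translation table
-- (str.maketrans/translate); objective: idiomatic.

-- ===== PORT A =====
def pyIsUpper (ch : Char) : Bool := if 'A' ≤ ch ∧ ch ≤ 'Z' then true else false

def pyIsLower (ch : Char) : Bool := if 'a' ≤ ch ∧ ch ≤ 'z' then true else false

def reciprocalString (word : String) : String :=
  String.ofList (word.toList.foldl (fun ct c =>
    if pyIsUpper c then ct ++ [Char.ofNat ('Z'.toNat - c.toNat + 'A'.toNat)]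
    else if pyIsLower c then ct ++ [Char.ofNat ('z'.toNat - c.toNat + 'a'.toNat)]
    else ct ++ [c]) [])

-- ===== PORT B =====
def pvUpper : List Char := "ABCDEFGHIJKLMNOPQRSTUVWXYZ".toList
def pvLower : List Char := PySem.Chars.lower pvUpper
-- str.maketrans(x, y): a mapping from each char of x to the char of y at the same index
def pvTable : PySem.Dict Char Char :=
  PySem.Dict.ofList ((pvUpper ++ pvLower).zip (pvUpper.reverse ++ pvLower.reverse))

def reciprocalString_alt (word : String) : String :=
  String.ofList (word.toList.map (fun c => PySem.Dict.getD pvTable c c))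

-- ===== PRECONDITION & SPEC =====
def Spec_reciprocalString (word : String) (out : String) : Prop := out = reciprocalString_alt word
instance (word : String) (out : String) : Decidable (Spec_reciprocalString word out) := by unfold Spec_reciprocalString; infer_instance

-- ===== CLAIM (what is proved, stated in full; the proofs are below) =====
def Claim_equal_reciprocalString : Prop := ∀ (word : String), Dom_reciprocalString word → Spec_reciprocalString word (reciprocalString word)

-- ===== LEMMAS AND PROOFS =====
def pvStepA (c : Char) : Char :=
  if pyIsUpper c then Char.ofNat ('Z'.toNat - c.toNat + 'A'.toNat)
  else if pyIsLower c then Char.ofNat ('z'.toNat - c.toNat + 'a'.toNat)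
  else c

set_option maxRecDepth 8192 in
theorem pvStep_eq_small : ∀ n : Nat, n < 127 →
    pvStepA (Char.ofNat n) = PySem.Dict.getD pvTable (Char.ofNat n) (Char.ofNat n) := by
  decide

theorem pvStep_eq (c : Char) (h : pvDomChar c = true) :
    pvStepA c = PySem.Dict.getD pvTable c c := by
  have hn : c.toNat < 127 := by
    simp [pvDomChar] at h
    omega
  have hv : Char.ofNat c.toNat = c := by
    have hvc : c.toNat.isValidChar := by constructor; omega
    apply Char.ext
    rw [Char.ofNat, dif_pos hvc]
    simp only [Char.ofNatAux]
    exact UInt32.toFin_inj.mp rfl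
  have := pvStep_eq_small c.toNat hn
  rwa [hv] at this

-- ===== VERDICT (by name: the statement is the Claim_ definition above) =====
set_option maxRecDepth 8192 in
theorem reciprocalString_spec : Claim_equal_reciprocalString := by
  intro word hdom
  unfold Spec_reciprocalString reciprocalString reciprocalString_alt
  have hfold : word.toList.foldl (fun ct c =>
      if pyIsUpper c then ct ++ [Char.ofNat ('Z'.toNat - c.toNat + 'A'.toNat)]
      else if pyIsLower c then ct ++ [Char.ofNat ('z'.toNat - c.toNat + 'a'.toNat)]
      else ct ++ [c]) [] = word.toList.foldl (fun ct c => ct ++ [pvStepA c]) [] := by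
    apply PySem.List.foldl_congr_mem
    intro acc c _
    simp only [pvStepA]
    split_ifs <;> rfl
  rw [hfold, PySem.List.foldl_append_singleton_eq_map]
  simp only [List.nil_append]
  congr 1
  apply List.map_congr_left
  intro c hc
  have : pvDomChar c = true := by
    have := hdom
    unfold Dom_reciprocalString pvDomStr at this
    exact List.all_eq_true.mp this c hc
  exact pvStep_eq c this
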